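-- pv_equiv track=rewrite | github.com/zasonic/iMakeAiTeams | MyAIAgentHub_v5/app/services/retrieval_refiner.py | _keyword_reformulate
-- ===== SOURCE A (Python) =====
-- def _keyword_reformulate(query: str) -> str:
--     """
--     Simple keyword-based query reformulation.
--
--     Strips common question words and function words to extract the core
--     search terms, then reorders by likely importance.
--     """
--     stop_words = {
--         "what", "is", "are", "was", "were", "how", "do", "does", "did",
--         "can", "could", "would", "should", "the", "a", "an", "in", "on",
--         "at", "to", "for", "of", "with", "by", "from", "about", "tell",
--         "me", "my", "your", "this", "that", "it", "and", "or", "but",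
--         "i", "we", "they", "you", "he", "she", "please", "explain",
--         "describe", "show", "find", "get", "give", "help", "know",
--         "want", "need", "like", "think", "any", "some", "there",
--     }
--
--     words = query.lower().split()
--     keywords = [w.strip("?.,!\"'") for w in words if w.lower().strip("?.,!\"'") not in stop_words]
--
--     if len(keywords) == 0:
--         return query  # Can't reformulate, use original
--
--     # Take the most distinctive terms (longer words tend to be more specific)
--     keywords.sort(key=lambda w: len(w), reverse=True)
--     return " ".join(keywords[:5])
-- ===== SOURCE B (Python) =====
-- def _keyword_reformulate(query: str) -> str:
--     """Keyword reformulation via length-bucket countdown instead of sorting."""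
--     stop_words = {
--         "what", "is", "are", "was", "were", "how", "do", "does", "did",
--         "can", "could", "would", "should", "the", "a", "an", "in", "on",
--         "at", "to", "for", "of", "with", "by", "from", "about", "tell",
--         "me", "my", "your", "this", "that", "it", "and", "or", "but",
--         "i", "we", "they", "you", "he", "she", "please", "explain",
--         "describe", "show", "find", "get", "give", "help", "know",
--         "want", "need", "like", "think", "any", "some", "there",
--     }
--
--     words = query.lower().split()
--     keywords = [w.strip("?.,!\"'") for w in words if w.lower().strip("?.,!\"'") not in stop_words]
--
--     if len(keywords) == 0:
--         return query
--
--     # Counting-style selection: instead of a comparison sort, walk the possible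
--     # lengths from the maximum down, appending each length's words in first-seen
--     # order (which reproduces the stable descending sort), then keep the first 5.
--     maxlen = 0
--     for k in keywords:
--         if len(k) > maxlen:
--             maxlen = len(k)
--     out = []
--     for length in range(maxlen, -1, -1):
--         for k in keywords:
--             if len(k) == length:
--                 out.append(k)
--     return " ".join(out[:5])
-- ===== Notes on version B (the rewrite author's own statement) =====
-- stated objective: alternative
-- what changed: Replaces the stable descending length-sort plus slice by a counting-style selection: compute the maximum keyword length, then walk lengths from the maximum down to 0 collecting each length's keywords in first-seen order and join the first five.
import Mathlib
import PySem

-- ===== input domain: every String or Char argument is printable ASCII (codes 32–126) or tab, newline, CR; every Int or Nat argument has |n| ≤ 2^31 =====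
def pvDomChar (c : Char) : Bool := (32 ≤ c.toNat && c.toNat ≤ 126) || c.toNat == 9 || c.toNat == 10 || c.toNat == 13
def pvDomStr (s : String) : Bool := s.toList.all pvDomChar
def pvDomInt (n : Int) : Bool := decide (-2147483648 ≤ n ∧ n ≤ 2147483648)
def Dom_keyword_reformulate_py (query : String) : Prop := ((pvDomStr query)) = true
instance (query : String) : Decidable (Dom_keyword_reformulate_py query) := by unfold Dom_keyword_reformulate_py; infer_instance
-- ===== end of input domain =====

-- B replaces A's stable descending sort + slice by a counting-style selection that
-- walks word lengths from the maximum down, collecting each length's words in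
-- first-seen order (objective: alternative algorithm, similar cost).

-- the stop-word set literal of the Python source (a set of distinct literals)
def pvStopSet : PySem.Set String := PySem.Set.ofList
  ["what", "is", "are", "was", "were", "how", "do", "does", "did",
   "can", "could", "would", "should", "the", "a", "an", "in", "on",
   "at", "to", "for", "of", "with", "by", "from", "about", "tell",
   "me", "my", "your", "this", "that", "it", "and", "or", "but",
   "i", "we", "they", "you", "he", "she", "please", "explain",
   "describe", "show", "find", "get", "give", "help", "know",
   "want", "need", "like", "think", "any", "some", "there"]

def pvChars : String := "?.,!\"'"

-- ===== PORT A =====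
def keyword_reformulate_py (query : String) : String :=
  let words := PySem.Str.split₀ (PySem.Str.lower query)
  let keywords := (words.filter
      (fun w => !(PySem.Set.contains pvStopSet (PySem.Str.stripChars (PySem.Str.lower w) pvChars)))).map
      (fun w => PySem.Str.stripChars w pvChars)
  if keywords.length = 0 then query
  else PySem.Str.join " "
    (PySem.List.slice (PySem.List.sorted keywords (fun w => PySem.Str.len w) true) none (some 5))

-- ===== PORT B =====
def keyword_reformulate_py_alt (query : String) : String :=
  let words := PySem.Str.split₀ (PySem.Str.lower query)
  let keywords := (words.filter
      (fun w => !(PySem.Set.contains pvStopSet (PySem.Str.stripChars (PySem.Str.lower w) pvChars)))).map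
      (fun w => PySem.Str.stripChars w pvChars)
  if keywords.length = 0 then query
  else
    let maxlen : Int := keywords.foldl
      (fun acc k => if PySem.Str.len k > acc then PySem.Str.len k else acc) 0
    let out := (PySem.List.pyRange maxlen (-1) (-1)).foldl
      (fun acc L => acc ++ keywords.filter (fun k => PySem.Str.len k == L)) ([] : List String)
    PySem.Str.join " " (PySem.List.slice out none (some 5))

-- ===== PRECONDITION & SPEC =====
def Spec_keyword_reformulate_py (query : String) (out : String) : Prop := out = keyword_reformulate_py_alt query
instance (query : String) (out : String) : Decidable (Spec_keyword_reformulate_py query out) := by unfold Spec_keyword_reformulate_py; infer_instance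

-- ===== CLAIM (what is proved, stated in full; the proofs are below) =====
def Claim_equal_keyword_reformulate_py : Prop := ∀ (query : String), Dom_keyword_reformulate_py query → Spec_keyword_reformulate_py query (keyword_reformulate_py query)

-- ===== LEMMAS AND PROOFS =====

-- the if-max accumulator of B is the running max
theorem pv_foldl_ifmax (ks : List String) (a : Int) :
    ks.foldl (fun acc k => if PySem.Str.len k > acc then PySem.Str.len k else acc) a
      = ks.foldl (fun acc k => max acc (PySem.Str.len k)) a := by
  induction ks generalizing a with
  | nil => rfl
  | cons k t ih =>
    simp only [List.foldl_cons]
    rw [show (if PySem.Str.len k > a then PySem.Str.len k else a) = max a (PySem.Str.len k) by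
      rw [max_def]; split_ifs <;> omega]
    exact ih _

-- insertBy passes over a prefix it does not insert before
theorem pv_insertBy_append_not_before {α : Type} (b : α → α → Bool) (x : α) (l r : List α)
    (h : ∀ y ∈ l, b x y = false) :
    PySem.List.insertBy b x (l ++ r) = l ++ PySem.List.insertBy b x r := by
  induction l with
  | nil => simp
  | cons y t ih =>
    have hy : b x y = false := h y (by simp)
    cases t <;> cases r <;>
      simp_all [PySem.List.insertBy]

-- insertBy puts x in front when it goes before everything
theorem pv_insertBy_front {α : Type} (b : α → α → Bool) (x : α) (r : List α)
    (h : ∀ y ∈ r, b x y = true) :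
    PySem.List.insertBy b x r = x :: r := by
  cases r with
  | nil => rfl
  | cons z zs => simp [PySem.List.insertBy, h z (by simp)]

-- inserting x into length-groups listed in strictly descending key order
theorem pv_insert_groups {α : Type} (k : α → Int) (x : α) (Ls : List Int) (F : Int → List α)
    (hLs : Ls.Pairwise (· > ·)) (hx : k x ∈ Ls) (hF : ∀ L, ∀ y ∈ F L, k y = L) :
    PySem.List.insertBy (fun a b => decide (k b < k a)) x (Ls.flatMap F)
      = Ls.flatMap (fun L => F L ++ if k x == L then [x] else []) := by
  induction Ls with
  | nil => cases hx
  | cons L Lt ih =>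
    rw [List.pairwise_cons] at hLs
    obtain ⟨hgt, hpt⟩ := hLs
    by_cases hkx : k x = L
    · -- x belongs to the head group: pass its group, insert in front of the rest
      rw [List.flatMap_cons,
        pv_insertBy_append_not_before _ _ _ _ (by
          intro y hy; have := hF L y hy; simp [this, hkx]),
        pv_insertBy_front _ _ _ (by
          intro y hy
          obtain ⟨L', hL', hyF⟩ := List.mem_flatMap.mp hy
          have := hF L' y hyF
          have := hgt L' hL'
          simp only [decide_eq_true_eq]; omega)]
      rw [List.flatMap_cons]
      have htail : Lt.flatMap (fun L' => F L' ++ if k x == L' then [x] else []) = Lt.flatMap F := by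
        apply List.flatMap_congr
        intro L' hL'
        have : k x ≠ L' := by have := hgt L' hL'; omega
        simp [this]
      rw [htail]
      simp [hkx]
    · -- x belongs to a later group: pass the head group, recurse
      have hx' : k x ∈ Lt := by
        rcases List.mem_cons.mp hx with h | h
        · exact absurd h hkx
        · exact h
      rw [List.flatMap_cons,
        pv_insertBy_append_not_before _ _ _ _ (by
          intro y hy
          have hy' := hF L y hy
          have : k x < L := hgt _ hx'
          simp only [decide_eq_false_iff_not]; omega),
        ih hpt hx', List.flatMap_cons]
      have : (k x == L) = false := by simp [hkx]
      simp [this]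

-- the stable descending sort is the concatenation of the key-groups in descending key order
theorem pv_sorted_rev_eq_groups {α : Type} (k : α → Int) (Ls : List Int) (ks : List α)
    (hLs : Ls.Pairwise (· > ·)) (hmem : ∀ x ∈ ks, k x ∈ Ls) :
    PySem.List.sorted ks k true = Ls.flatMap (fun L => ks.filter (fun x => k x == L)) := by
  induction ks using List.reverseRecOn with
  | nil => simp [PySem.List.sorted_rev_eq_foldl_insertBy]
  | append_singleton t x ih =>
    have ht : ∀ y ∈ t, k y ∈ Ls := fun y hy => hmem y (by simp [hy])
    have hx : k x ∈ Ls := hmem x (by simp)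
    rw [PySem.List.sorted_rev_eq_foldl_insertBy, List.foldl_append, List.foldl_cons, List.foldl_nil,
      ← PySem.List.sorted_rev_eq_foldl_insertBy, ih ht,
      pv_insert_groups k x Ls _ hLs hx (by intro L y hy; simpa using (List.mem_filter.mp hy).2)]
    apply List.flatMap_congr
    intro L _
    simp only [List.filter_append]
    congr 1
    simp only [List.filter_cons, List.filter_nil, beq_iff_eq]

-- the countdown range is strictly descending
theorem pv_pyRange_neg_one_pairwise_gt (a b : Int) :
    (PySem.List.pyRange a b (-1)).Pairwise (· > ·) := by
  rw [PySem.List.pyRange_neg_one_eq_reverse, List.pairwise_reverse]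
  exact PySem.List.pairwise_lt_pyRange_one _ _

-- the crux: B's bucket countdown builds exactly A's sorted keyword list
theorem pv_selection_eq (ks : List String) :
    PySem.List.sorted ks (fun w => PySem.Str.len w) true
      = (PySem.List.pyRange
            (ks.foldl (fun acc k => if PySem.Str.len k > acc then PySem.Str.len k else acc) 0)
            (-1) (-1)).foldl
          (fun acc L => acc ++ ks.filter (fun k => PySem.Str.len k == L)) [] := by
  rw [pv_foldl_ifmax, PySem.List.foldl_append_eq_flatMap, List.nil_append]
  apply pv_sorted_rev_eq_groups
  · exact pv_pyRange_neg_one_pairwise_gt _ _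
  · intro x hx
    rw [PySem.List.mem_pyRange_neg_one]
    constructor
    · have : (0 : Int) ≤ PySem.Str.len x := by
        simp [PySem.Str.len_eq]
      omega
    · exact (PySem.List.le_foldl_max_int ks (fun w => PySem.Str.len w) 0).2 x hx

-- ===== VERDICT (by name: the statement is the Claim_ definition above) =====
theorem keyword_reformulate_py_spec : Claim_equal_keyword_reformulate_py := by
  intro query _
  unfold Spec_keyword_reformulate_py keyword_reformulate_py keyword_reformulate_py_alt
  simp only []
  rw [pv_selection_eq]
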